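-- pv_equiv track=rewrite | github.com/Omen4Dead/py.checkio | List, list and list again/Convert and Aggregate.py | conv_aggr
-- ===== SOURCE A (Python) =====
-- def conv_aggr(data: list[tuple[str, int]]) -> dict[str, int]:
--     # your code here
--     df = {}
--     for k, v in data:
--         if k == '':
--             continue
--         if k not in df: df[k] = v
--         else: df[k] = df[k] + v
--     df_copy = df.copy()
--     for k, v in df_copy.items():
--         if v == 0:
--             df.pop(k)
--     return df
-- ===== SOURCE B (Python) =====
-- def conv_aggr(data: list[tuple[str, int]]) -> dict[str, int]:
--     # Pass 1: group values per non-empty key, preserving first-occurrence order.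
--     groups = {}
--     for k, v in data:
--         if k != '':
--             groups.setdefault(k, []).append(v)
--     # Pass 2: sum each group and keep only non-zero totals.
--     return {k: total for k, vs in groups.items() if (total := sum(vs)) != 0}
-- ===== Notes on version B (the rewrite author's own statement) =====
-- stated objective: alternative
-- what changed: B groups values into per-key lists in one pass and then builds the result fresh by summing each group and dropping zero totals in a comprehension, instead of A's running-sum dict followed by a copy-then-pop deletion loop.
import Mathlib
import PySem

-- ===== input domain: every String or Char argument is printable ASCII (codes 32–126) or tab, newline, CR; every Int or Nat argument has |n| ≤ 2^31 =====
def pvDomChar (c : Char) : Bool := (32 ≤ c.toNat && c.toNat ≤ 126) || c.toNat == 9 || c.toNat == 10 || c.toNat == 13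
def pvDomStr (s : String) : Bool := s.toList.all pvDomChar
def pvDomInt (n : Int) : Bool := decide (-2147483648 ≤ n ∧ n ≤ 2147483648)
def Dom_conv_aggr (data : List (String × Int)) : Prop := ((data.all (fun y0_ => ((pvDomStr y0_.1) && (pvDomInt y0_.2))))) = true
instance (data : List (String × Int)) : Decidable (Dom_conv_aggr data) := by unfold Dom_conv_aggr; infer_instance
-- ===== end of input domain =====

-- B replaces A's running-sum dict plus copy-then-pop filter with a group-into-lists pass
-- followed by a fresh sum-and-filter comprehension (alternative decomposition, same cost).

-- ===== PORT A =====
-- body of A's first loop: skip '' keys, else running sum per key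
def convStepA (df : PySem.Dict String Int) (kv : String × Int) : PySem.Dict String Int :=
  if kv.1 == "" then df
  else if df.contains kv.1 = false then df.insert kv.1 kv.2
  else df.insert kv.1 (df.getD kv.1 0 + kv.2)

-- body of A's second loop: df.pop(k) for zero values (the key is always present, so pop = erase)
def convStepPop (d : PySem.Dict String Int) (kv : String × Int) : PySem.Dict String Int :=
  if kv.2 == 0 then d.erase kv.1 else d

def conv_aggr (data : List (String × Int)) : List (String × Int) :=
  let df := data.foldl convStepA PySem.Dict.empty
  let dfCopy := df.items
  (dfCopy.foldl convStepPop df).items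

-- ===== PORT B =====
-- pass 1 body: groups.setdefault(k, []).append(v) for non-empty keys
def convStepB (g : PySem.Dict String (List Int)) (kv : String × Int) : PySem.Dict String (List Int) :=
  if kv.1 != "" then g.modify kv.1 [] (fun vs => vs ++ [kv.2]) else g

def conv_aggr_alt (data : List (String × Int)) : List (String × Int) :=
  let groups := data.foldl convStepB PySem.Dict.empty
  groups.items.filterMap (fun p =>
    let total := p.2.sum
    if total ≠ 0 then some (p.1, total) else none)

-- ===== PRECONDITION & SPEC =====
def Spec_conv_aggr (data : List (String × Int)) (out : List (String × Int)) : Prop := out = conv_aggr_alt data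
instance (data : List (String × Int)) (out : List (String × Int)) : Decidable (Spec_conv_aggr data out) := by unfold Spec_conv_aggr; infer_instance

-- ===== CLAIM (what is proved, stated in full; the proofs are below) =====
def Claim_equal_conv_aggr : Prop := ∀ (data : List (String × Int)), Dom_conv_aggr data → Spec_conv_aggr data (conv_aggr data)

-- ===== LEMMAS AND PROOFS =====

-- summing a group gives the corresponding running-sum entry
def convSumPair (p : String × List Int) : String × Int := (p.1, p.2.sum)

theorem conv_find_map (l : List (String × List Int)) (k : String) :
    (l.map convSumPair).find? (fun p => p.1 == k) = (l.find? (fun p => p.1 == k)).map convSumPair := by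
  rw [List.find?_map]
  rfl

theorem conv_phase1 (data : List (String × Int)) :
    ∀ (d : PySem.Dict String Int) (g : PySem.Dict String (List Int)),
      d.items = g.items.map convSumPair →
      (data.foldl convStepA d).items = (data.foldl convStepB g).items.map convSumPair := by
  induction data with
  | nil => intro d g h; simpa using h
  | cons kv rest ih =>
    intro d g h
    simp only [List.foldl_cons]
    apply ih
    by_cases hk : kv.1 = ""
    · simpa [convStepA, convStepB, hk] using h
    · have hbk : (kv.1 == "") = false := by simp [hk]
      have hcont : d.contains kv.1 = g.contains kv.1 := by
        simp only [PySem.Dict.contains, h, List.any_map]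
        rfl
      have hget : d.getD kv.1 0 = (g.getD kv.1 []).sum := by
        simp only [PySem.Dict.getD, PySem.Dict.get?, h, conv_find_map]
        cases g.items.find? (fun p => p.1 == kv.1) <;> simp [convSumPair]
      by_cases hc : g.contains kv.1 = true
      · -- key already present: both replace in place
        have hdc : d.contains kv.1 = true := by rw [hcont]; exact hc
        have hA : (convStepA d kv).items
            = d.items.map (fun p => if (p.1 == kv.1) = true then (kv.1, d.getD kv.1 0 + kv.2) else p) := by
          simp [convStepA, hbk, hdc, PySem.Dict.insert]
        have hB : (convStepB g kv).items
            = g.items.map (fun p => if (p.1 == kv.1) = true then (kv.1, g.getD kv.1 [] ++ [kv.2]) else p) := by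
          simp [convStepB, hk, PySem.Dict.modify, PySem.Dict.insert, hc]
        rw [hA, hB, h, List.map_map, List.map_map]
        apply List.map_congr_left
        intro p _
        by_cases hp : (p.1 == kv.1) = true <;>
          simp [convSumPair, hp, Function.comp, hget]
      · -- new key: both append
        have hc' : g.contains kv.1 = false := by simpa using hc
        have hdc : d.contains kv.1 = false := by rw [hcont]; exact hc'
        have hgd : g.getD kv.1 [] = [] := PySem.Dict.getD_of_not_contains _ _ hc'
        have hA : (convStepA d kv).items = d.items ++ [kv] := by
          simp [convStepA, hbk, hdc, PySem.Dict.insert]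
        have hB : (convStepB g kv).items = g.items ++ [(kv.1, [kv.2])] := by
          simp [convStepB, hk, PySem.Dict.modify, PySem.Dict.insert, hc', hgd]
        rw [hA, hB, h]
        simp [convSumPair]

-- A's first loop keeps the keys duplicate-free
theorem conv_nodupA (data : List (String × Int)) :
    ∀ (d : PySem.Dict String Int), d.keys.Nodup → (data.foldl convStepA d).keys.Nodup := by
  induction data with
  | nil => intro d h; simpa using h
  | cons kv rest ih =>
    intro d h
    simp only [List.foldl_cons]
    apply ih
    unfold convStepA
    split_ifs <;> first | exact h | exact PySem.Dict.nodup_keys_insert _ _ _ h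

-- A's pop loop = filtering out the zero-keys collected from the iterated list
theorem conv_phase2 (L : List (String × Int)) :
    ∀ (d : PySem.Dict String Int),
      (L.foldl convStepPop d).items
        = d.items.filter
            (fun q => !((L.filter (fun p => p.2 == 0)).map Prod.fst).any (fun z => q.1 == z)) := by
  induction L with
  | nil => intro d; simp
  | cons p rest ih =>
    intro d
    simp only [List.foldl_cons]
    by_cases hz : (p.2 == 0) = true
    · rw [convStepPop, if_pos hz, ih]
      rw [show List.filter (fun p => p.2 == 0) (p :: rest)
            = p :: List.filter (fun p => p.2 == 0) rest from List.filter_cons_of_pos hz]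
      simp only [PySem.Dict.erase, List.filter_filter, List.map_cons, List.any_cons]
      apply List.filter_congr
      intro q _
      by_cases hq : (q.1 == p.1) = true <;> simp [hq]
    · rw [convStepPop, if_neg hz, ih,
        show List.filter (fun p => p.2 == 0) (p :: rest)
          = List.filter (fun p => p.2 == 0) rest from List.filter_cons_of_neg hz]

-- with duplicate-free keys, the zero-key filter is just "value ≠ 0"
theorem conv_filter_nodup (items : List (String × Int)) (hnd : (items.map Prod.fst).Nodup) :
    items.filter
        (fun q => !((items.filter (fun p => p.2 == 0)).map Prod.fst).any (fun z => q.1 == z))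
      = items.filter (fun q => !(q.2 == 0)) := by
  apply List.filter_congr
  intro q hq
  have hkey : ((items.filter (fun p => p.2 == 0)).map Prod.fst).any (fun z => q.1 == z)
      = (q.2 == 0) := by
    by_cases h0 : q.2 = 0
    · simp only [h0, BEq.rfl]
      exact List.any_eq_true.mpr
        ⟨q.1, List.mem_map_of_mem (List.mem_filter.mpr ⟨hq, by simp [h0]⟩), by simp⟩
    · rw [show (q.2 == 0) = false by simpa using h0]
      apply List.any_eq_false.mpr
      intro z hz
      rcases List.mem_map.mp hz with ⟨pp, hpmem, rfl⟩
      rcases List.mem_filter.mp hpmem with ⟨hpin, hp0⟩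
      intro hcon
      have heq : pp.1 = q.1 := by
        have : (q.1 == pp.1) = true := hcon
        exact (beq_iff_eq.mp this).symm
      have hpq : pp = q := List.inj_on_of_nodup_map hnd hpin hq heq
      exact h0 (by rw [← hpq]; exact beq_iff_eq.mp hp0)
  rw [hkey]

-- B's comprehension = mapping to sums then filtering non-zeros
theorem conv_filterMap_eq (l : List (String × List Int)) :
    (l.filterMap (fun p =>
        let total := p.2.sum
        if total ≠ 0 then some (p.1, total) else none))
      = (l.map convSumPair).filter (fun q => !(q.2 == 0)) := by
  induction l with
  | nil => rfl
  | cons p rest ih =>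
    simp only [List.filterMap_cons, List.map_cons]
    by_cases h : p.2.sum = 0
    · rw [show (let total := p.2.sum;
          if total ≠ 0 then some (p.1, total) else none) = none from by simp [h]]
      rw [ih, List.filter_cons]
      simp [convSumPair, h]
    · rw [show (let total := p.2.sum;
          if total ≠ 0 then some (p.1, total) else none) = some (p.1, p.2.sum) from by simp [h]]
      rw [ih, List.filter_cons]
      simp [convSumPair, h]

-- ===== VERDICT (by name: the statement is the Claim_ definition above) =====
theorem conv_aggr_spec : Claim_equal_conv_aggr := by
  intro data _
  unfold Spec_conv_aggr conv_aggr conv_aggr_alt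
  have h1 := conv_phase1 data PySem.Dict.empty PySem.Dict.empty (by rfl)
  have hnd : ((data.foldl convStepA PySem.Dict.empty).items.map Prod.fst).Nodup :=
    conv_nodupA data PySem.Dict.empty (by simp [PySem.Dict.keys_empty])
  rw [conv_phase2, conv_filter_nodup _ hnd, conv_filterMap_eq, h1]
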